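-- pv_equiv track=rewrite | github.com/learn-ukrainian/learn-ukrainian.github.io | scripts/audit/checks/rule_engine.py | _extract_marked_sections
-- ===== SOURCE A (Python) =====
-- def _extract_marked_sections(content: str, markers: list[str]) -> list[tuple[str, str, int]]:
--     """Extract text sections that follow marker headings.
--
--     Returns list of (marker_name, section_text, start_line_number).
--     A section extends from the marker line to the next heading of equal or
--     higher level, or end of file.
--     """
--     lines = content.split("\n")
--     results: list[tuple[str, str, int]] = []
--
--     for i, line in enumerate(lines):
--         # Only match markers in actual headings (not prose text)
--         if _heading_level(line) == 0:
--             continue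
--         stripped = line.strip().lstrip("#").strip()
--         for marker in markers:
--             if marker.lower() in stripped.lower():
--                 # Determine heading level of this marker
--                 marker_level = _heading_level(line)
--                 # Collect lines until next heading of equal/higher level
--                 section_lines: list[str] = []
--                 for j in range(i + 1, len(lines)):
--                     hl = _heading_level(lines[j])
--                     if hl > 0 and hl <= marker_level:
--                         break
--                     section_lines.append(lines[j])
--                 results.append((marker, "\n".join(section_lines), i + 1))
--                 break  # Don't match multiple markers on same line
--     return results
--
-- def _heading_level(line: str) -> int:
--     """Return markdown heading level (1-6) or 0 if not a heading."""
--     stripped = line.lstrip()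
--     if stripped.startswith("#"):
--         hashes = len(stripped) - len(stripped.lstrip("#"))
--         if hashes <= 6 and (len(stripped) == hashes or stripped[hashes] == " "):
--             return hashes
--     return 0
-- ===== SOURCE B (Python) =====
-- def _heading_level(line: str) -> int:
--     """Return markdown heading level (1-6) or 0 if not a heading."""
--     stripped = line.lstrip()
--     if stripped.startswith("#"):
--         hashes = len(stripped) - len(stripped.lstrip("#"))
--         if hashes <= 6 and (len(stripped) == hashes or stripped[hashes] == " "):
--             return hashes
--     return 0
--
--
-- def _extract_marked_sections(content: str, markers: list[str]) -> list[tuple[str, str, int]]: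
--     """Extract text sections that follow marker headings.
--
--     Single backward pass computes, for every line, the section text that would
--     start right after it (for its heading level), by maintaining for each of
--     the six levels the shared suffix-section as a cons list; a forward pass
--     then only matches markers and emits results.
--     """
--     lines = content.split("\n")
--     # secs[k] = cons-list of the lines from the current position to the next
--     # heading of level <= k+1 (exclusive), shared between positions.
--     secs = [None] * 6
--     texts = []  # per line: joined section text if the line is a heading, else None
--     for line in reversed(lines):
--         li = _heading_level(line)
--         if li:
--             parts = []
--             cell = secs[li - 1]
--             while cell is not None:
--                 parts.append(cell[0])
--                 cell = cell[1]
--             texts.append("\n".join(parts))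
--         else:
--             texts.append(None)
--         secs = [None if (li and li <= k + 1) else (line, secs[k]) for k in range(6)]
--     texts.reverse()
--
--     results: list[tuple[str, str, int]] = []
--     for i, (line, txt) in enumerate(zip(lines, texts)):
--         if txt is None:
--             continue
--         stripped_lower = line.strip().lstrip("#").strip().lower()
--         for marker in markers:
--             if marker.lower() in stripped_lower:
--                 results.append((marker, txt, i + 1))
--                 break
--     return results
-- ===== Notes on version B (the rewrite author's own statement) =====
-- stated objective: alternative
-- what changed: Replaces the per-marker-hit forward rescan for the section end with one backward pass that maintains, for each of the six heading levels, the shared suffix section as a cons list, producing every heading's section text once; the forward pass then only matches markers.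
import Mathlib
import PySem

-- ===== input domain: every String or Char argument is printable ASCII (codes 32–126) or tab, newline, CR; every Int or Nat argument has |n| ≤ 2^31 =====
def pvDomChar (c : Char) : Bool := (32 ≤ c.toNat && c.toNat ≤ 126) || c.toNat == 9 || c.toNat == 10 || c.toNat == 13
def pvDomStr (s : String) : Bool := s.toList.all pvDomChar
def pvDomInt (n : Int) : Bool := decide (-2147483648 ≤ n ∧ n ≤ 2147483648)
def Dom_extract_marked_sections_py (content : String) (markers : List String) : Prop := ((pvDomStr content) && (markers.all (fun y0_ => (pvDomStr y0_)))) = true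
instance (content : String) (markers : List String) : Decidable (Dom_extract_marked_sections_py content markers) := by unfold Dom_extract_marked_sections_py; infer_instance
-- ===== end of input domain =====

-- B replaces A's per-heading forward rescan with one backward pass sharing suffix sections per level (alternative decomposition, same results).

-- ===== PORT A =====
-- shared helper _heading_level (identical in both Pythons).
-- s.lstrip("#") is ported by hand as dropWhile (· == '#'): exact (removes leading chars of the set {'#'});
-- stripped[hashes] is ported as getD: exact because the branch is only taken with hashes < length (the `or` short-circuit).
def headingLevel (line : String) : Nat :=
  let s := PySem.Chars.lstrip line.toList
  if PySem.Chars.startswith s ['#'] then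
    let hashes := s.length - (s.dropWhile (· == '#')).length
    if hashes ≤ 6 ∧ (s.length = hashes ∨ s.getD hashes ' ' = ' ') then hashes else 0
  else 0

-- shared: line.strip().lstrip("#").strip(), and the first marker whose lowercase is contained in its lowercase (first match + break)
def firstMarker (markers : List String) (line : String) : Option String :=
  let strippedLower := PySem.Chars.lower (PySem.Chars.strip ((PySem.Chars.strip line.toList).dropWhile (· == '#')))
  markers.find? (fun m => PySem.Chars.isIn (PySem.Chars.lower m.toList) strippedLower)

-- A's inner loop over j in range(i+1, len(lines)) with break, collecting section_lines
def collectA (ml : Nat) : List String → List String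
  | [] => []
  | l :: t => if 0 < headingLevel l ∧ headingLevel l ≤ ml then [] else l :: collectA ml t

-- A's outer loop over enumerate(lines)
def goA (markers : List String) : List String → Nat → List (String × String × Int)
  | [], _ => []
  | line :: t, i =>
    if headingLevel line = 0 then goA markers t (i + 1)
    else
      match firstMarker markers line with
      | none => goA markers t (i + 1)
      | some m => (m, PySem.Str.join "\n" (collectA (headingLevel line) t), (i : Int) + 1) :: goA markers t (i + 1)

-- content.split("\n"): sep "\n" ≠ "" so split? is always some; getD [] is exact here
def extract_marked_sections_py (content : String) (markers : List String) : List (String × String × Int) :=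
  goA markers ((PySem.Str.split? content "\n").getD []) 0

-- ===== PORT B =====
-- B's backward pass: returns (secs, texts); secs.getD k = the cons-list secs[k] (section up to next heading of level ≤ k+1),
-- texts = per line the joined section text if the line is a heading, else none
def backwardB : List String → (List (List String)) × List (Option String)
  | [] => (List.replicate 6 [], [])
  | l :: t =>
    let p := backwardB t
    let li := headingLevel l
    ((List.range 6).map (fun k => if li ≠ 0 ∧ li ≤ k + 1 then ([] : List String) else l :: p.1.getD k []),
     (if li = 0 then none else some (PySem.Str.join "\n" (p.1.getD (li - 1) []))) :: p.2)

-- B's forward loop over enumerate(zip(lines, texts))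
def forwardB (markers : List String) : List (String × Option String) → Nat → List (String × String × Int)
  | [], _ => []
  | (line, txt?) :: t, i =>
    match txt? with
    | none => forwardB markers t (i + 1)
    | some txt =>
      match firstMarker markers line with
      | none => forwardB markers t (i + 1)
      | some m => (m, txt, (i : Int) + 1) :: forwardB markers t (i + 1)

def extract_marked_sections_py_alt (content : String) (markers : List String) : List (String × String × Int) :=
  let lines := (PySem.Str.split? content "\n").getD []
  forwardB markers (lines.zip (backwardB lines).2) 0

-- ===== PRECONDITION & SPEC =====
def Spec_extract_marked_sections_py (content : String) (markers : List String) (out : List (String × String × Int)) : Prop := out = extract_marked_sections_py_alt content markers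
instance (content : String) (markers : List String) (out : List (String × String × Int)) : Decidable (Spec_extract_marked_sections_py content markers out) := by unfold Spec_extract_marked_sections_py; infer_instance

-- ===== CLAIM (what is proved, stated in full; the proofs are below) =====
def Claim_equal_extract_marked_sections_py : Prop := ∀ (content : String) (markers : List String), Dom_extract_marked_sections_py content markers → Spec_extract_marked_sections_py content markers (extract_marked_sections_py content markers)

-- ===== LEMMAS AND PROOFS =====

-- a nonzero heading level is between 1 and 6
theorem headingLevel_bounds (line : String) (h : headingLevel line ≠ 0) :
    1 ≤ headingLevel line ∧ headingLevel line ≤ 6 := by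
  unfold headingLevel at *
  set s := PySem.Chars.lstrip line.toList with hs
  by_cases hst : PySem.Chars.startswith s ['#']
  · simp only [hst, if_true] at h ⊢
    split_ifs at h ⊢ with hg
    · refine ⟨?_, hg.1⟩
      omega
    · exact absurd rfl h
  · simp [hst] at h

-- backwardB's secs component is A's collect on the tail, level k+1
theorem backwardB_secs (t : List String) (k : Nat) (hk : k < 6) :
    (backwardB t).1.getD k [] = collectA (k + 1) t := by
  induction t with
  | nil =>
    simp only [backwardB, collectA]
    interval_cases k <;> rfl
  | cons l t ih =>
    simp only [backwardB, collectA]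
    rw [List.getD_eq_getElem?_getD, List.getElem?_map, List.getElem?_range hk]
    simp only [Option.map_some, Option.getD_some, ih]
    by_cases h0 : headingLevel l = 0
    · simp [h0]
    · by_cases hle : headingLevel l ≤ k + 1
      · simp [h0, hle, Nat.pos_of_ne_zero h0]
      · simp [h0, hle, Nat.pos_of_ne_zero h0]

-- the two main loops agree on every suffix and index
theorem main_loop_eq (markers : List String) (t : List String) (i : Nat) :
    goA markers t i = forwardB markers (t.zip (backwardB t).2) i := by
  induction t generalizing i with
  | nil => simp [goA, forwardB]
  | cons line t ih =>
    simp only [backwardB, List.zip_cons_cons, goA, forwardB]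
    by_cases h0 : headingLevel line = 0
    · simp [h0, ih]
    · have hb := headingLevel_bounds line h0
      have hk : headingLevel line - 1 < 6 := by omega
      have : headingLevel line - 1 + 1 = headingLevel line := by omega
      rw [backwardB_secs t (headingLevel line - 1) hk, this] at *
      simp only [h0, if_false]
      cases firstMarker markers line with
      | none => simp [ih]
      | some m => simp [ih]

-- ===== VERDICT (by name: the statement is the Claim_ definition above) =====
theorem extract_marked_sections_py_spec : Claim_equal_extract_marked_sections_py := by
  intro content markers _
  unfold Spec_extract_marked_sections_py extract_marked_sections_py extract_marked_sections_py_alt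
  exact main_loop_eq markers _ 0
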